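-- pv_equiv track=rewrite | github.com/mariok99/algo2 | ej3.py | obtenerSenadoresEnProvincia
-- ===== SOURCE A (Python) =====
-- def obtenerSenadoresEnProvincia(escrutinio:list[int]):
--     id:int = 0
--     firstValor: int = 0 #en la posición cero va el valor, en la 1 la posición
--     firstPosicion: int = 0
--     secondValor: int = 0
--     secondPosicion: int = 0
--     while id < len(escrutinio)-1:
--         if firstValor < escrutinio[id]:
--             secondValor = firstValor
--             secondPosicion = firstPosicion
--             firstValor = escrutinio[id]
--             firstPosicion = id
--         else:
--             pass
--
--         if secondValor < escrutinio[id] and escrutinio[id] < firstValor: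
--             secondValor = escrutinio[id]
--             secondPosicion = id
--
--         else:
--             pass
--         id = id + 1
--     res = (firstPosicion,secondPosicion)
--     return res
-- ===== SOURCE B (Python) =====
-- def obtenerSenadoresEnProvincia(escrutinio: list[int]):
--     # Pass 1: position of the maximum (0-seeded, first occurrence, last element excluded).
--     firstValor = 0
--     firstPosicion = 0
--     for i in range(len(escrutinio) - 1):
--         if firstValor < escrutinio[i]:
--             firstValor = escrutinio[i]
--             firstPosicion = i
--     # Pass 2: position of the best value strictly below the maximum.
--     secondValor = 0
--     secondPosicion = 0
--     for i in range(len(escrutinio) - 1):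
--         v = escrutinio[i]
--         if secondValor < v and v < firstValor:
--             secondValor = v
--             secondPosicion = i
--     return (firstPosicion, secondPosicion)
-- ===== Notes on version B (the rewrite author's own statement) =====
-- stated objective: simpler
-- what changed: A's fused single scan with a 4-field state (the second maximum inherits the displaced first) is replaced by two independent simple passes: find the position of the maximum, then the position of the best value strictly below it.
import Mathlib
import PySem

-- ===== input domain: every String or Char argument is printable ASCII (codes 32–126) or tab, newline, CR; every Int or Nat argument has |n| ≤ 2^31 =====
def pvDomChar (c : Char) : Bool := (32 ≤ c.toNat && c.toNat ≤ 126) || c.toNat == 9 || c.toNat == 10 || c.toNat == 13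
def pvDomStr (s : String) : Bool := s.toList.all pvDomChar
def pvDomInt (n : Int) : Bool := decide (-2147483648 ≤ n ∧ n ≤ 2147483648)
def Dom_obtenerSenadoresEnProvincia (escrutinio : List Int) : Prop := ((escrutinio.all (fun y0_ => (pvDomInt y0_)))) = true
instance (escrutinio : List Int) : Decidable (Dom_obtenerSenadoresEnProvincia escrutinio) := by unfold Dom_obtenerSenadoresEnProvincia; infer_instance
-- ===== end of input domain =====

-- B replaces A's fused single scan (4-field state, second inherits the displaced first)
-- by two independent simple scans: find the max position, then the best-below-max position
-- (objective: simpler decomposition; same cost).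

-- ===== PORT A =====
-- A's while loop over id < len-1: recursion stops when fewer than two elements remain,
-- carrying (firstValor, firstPosicion, secondValor, secondPosicion); the two sequential
-- ifs of the loop body are flattened into nested ifs.
def pvGoA : List Int → Int → Int → Int → Int → Int → Int × Int
  | [], _, _, fp, _, sp => (fp, sp)
  | [_], _, _, fp, _, sp => (fp, sp)
  | x :: y :: rest, i, fv, fp, sv, sp =>
    if fv < x then
      (if fv < x ∧ x < x then pvGoA (y :: rest) (i + 1) x i x i
       else pvGoA (y :: rest) (i + 1) x i fv fp)
    else
      (if sv < x ∧ x < fv then pvGoA (y :: rest) (i + 1) fv fp x i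
       else pvGoA (y :: rest) (i + 1) fv fp sv sp)

def obtenerSenadoresEnProvincia (escrutinio : List Int) : Int × Int :=
  pvGoA escrutinio 0 0 0 0 0

-- ===== PORT B =====
-- B's first for-loop over range(len-1): position of the maximum (0-seeded, first occurrence).
def pvPass1 : List Int → Int → Int → Int → Int × Int
  | [], _, fv, fp => (fv, fp)
  | [_], _, fv, fp => (fv, fp)
  | x :: y :: rest, i, fv, fp =>
    if fv < x then pvPass1 (y :: rest) (i + 1) x i
    else pvPass1 (y :: rest) (i + 1) fv fp

-- B's second for-loop: position of the best value strictly below the threshold t.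
def pvPass2 (t : Int) : List Int → Int → Int → Int → Int × Int
  | [], _, sv, sp => (sv, sp)
  | [_], _, sv, sp => (sv, sp)
  | x :: y :: rest, i, sv, sp =>
    if sv < x ∧ x < t then pvPass2 t (y :: rest) (i + 1) x i
    else pvPass2 t (y :: rest) (i + 1) sv sp

def obtenerSenadoresEnProvincia_alt (escrutinio : List Int) : Int × Int :=
  let f := pvPass1 escrutinio 0 0 0
  let s := pvPass2 f.1 escrutinio 0 0 0
  (f.2, s.2)

-- ===== PRECONDITION & SPEC =====
def Spec_obtenerSenadoresEnProvincia (escrutinio : List Int) (out : Int × Int) : Prop := out = obtenerSenadoresEnProvincia_alt escrutinio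
instance (escrutinio : List Int) (out : Int × Int) : Decidable (Spec_obtenerSenadoresEnProvincia escrutinio out) := by unfold Spec_obtenerSenadoresEnProvincia; infer_instance

-- ===== CLAIM (what is proved, stated in full; the proofs are below) =====
def Claim_equal_obtenerSenadoresEnProvincia : Prop := ∀ (escrutinio : List Int), Dom_obtenerSenadoresEnProvincia escrutinio → Spec_obtenerSenadoresEnProvincia escrutinio (obtenerSenadoresEnProvincia escrutinio)

-- ===== LEMMAS AND PROOFS =====

-- one-step unfolding lemmas for the three scans
lemma pvGoA_step_pos {x y i fv fp sv sp : Int} {rest : List Int} (h : fv < x) :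
    pvGoA (x :: y :: rest) i fv fp sv sp = pvGoA (y :: rest) (i + 1) x i fv fp := by
  simp [pvGoA, h]

lemma pvGoA_step_neg {x y i fv fp sv sp : Int} {rest : List Int} (h : ¬ fv < x) :
    pvGoA (x :: y :: rest) i fv fp sv sp =
      (if sv < x ∧ x < fv then pvGoA (y :: rest) (i + 1) fv fp x i
       else pvGoA (y :: rest) (i + 1) fv fp sv sp) := by
  simp [pvGoA, h]

lemma pvPass1_step_pos {x y i fv fp : Int} {rest : List Int} (h : fv < x) :
    pvPass1 (x :: y :: rest) i fv fp = pvPass1 (y :: rest) (i + 1) x i := by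
  simp [pvPass1, h]

lemma pvPass1_step_neg {x y i fv fp : Int} {rest : List Int} (h : ¬ fv < x) :
    pvPass1 (x :: y :: rest) i fv fp = pvPass1 (y :: rest) (i + 1) fv fp := by
  simp [pvPass1, h]

lemma pvPass2_step_pos {t x y i sv sp : Int} {rest : List Int} (h : sv < x ∧ x < t) :
    pvPass2 t (x :: y :: rest) i sv sp = pvPass2 t (y :: rest) (i + 1) x i := by
  simp [pvPass2, h]

lemma pvPass2_step_neg {t x y i sv sp : Int} {rest : List Int} (h : ¬ (sv < x ∧ x < t)) :
    pvPass2 t (x :: y :: rest) i sv sp = pvPass2 t (y :: rest) (i + 1) sv sp := by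
  simp [pvPass2, h]

-- pass 1's running maximum never decreases below its seed
lemma pvPass1_fst_ge : ∀ (l : List Int) (i fv fp : Int), fv ≤ (pvPass1 l i fv fp).1 := by
  intro l
  induction l with
  | nil => intro i fv fp; simp [pvPass1]
  | cons x tail ih =>
    intro i fv fp
    cases tail with
    | nil => simp [pvPass1]
    | cons y rest =>
      by_cases hx : fv < x
      · rw [pvPass1_step_pos hx]
        have := ih (i + 1) x i
        omega
      · rw [pvPass1_step_neg hx]
        exact ih (i + 1) fv fp

-- Main invariant: A's fused scan, from any state, equals pass 1 together with pass 2 run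
-- at the final maximum T, provided sv ≤ fv, and pass 2's state (bv,bp) is (fv,fp) while the
-- current first is still going to be displaced (fv < T), and (sv,sp) once it is final (fv = T).
lemma pvMain : ∀ (l : List Int) (i fv fp sv sp bv bp : Int),
    sv ≤ fv →
    (((bv, bp) = (fv, fp) ∧ fv < (pvPass1 l i fv fp).1) ∨
     ((bv, bp) = (sv, sp) ∧ fv = (pvPass1 l i fv fp).1)) →
    pvGoA l i fv fp sv sp =
      ((pvPass1 l i fv fp).2, (pvPass2 (pvPass1 l i fv fp).1 l i bv bp).2) := by
  intro l
  induction l with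
  | nil =>
    intro i fv fp sv sp bv bp hle hinv
    rcases hinv with ⟨_, hlt⟩ | ⟨heq, _⟩
    · simp [pvPass1] at hlt
    · injection heq with hb1 hb2
      simp [pvGoA, pvPass1, pvPass2, hb2]
  | cons x tail ih =>
    intro i fv fp sv sp bv bp hle hinv
    cases tail with
    | nil =>
      rcases hinv with ⟨_, hlt⟩ | ⟨heq, _⟩
      · simp [pvPass1] at hlt
      · injection heq with hb1 hb2
        simp [pvGoA, pvPass1, pvPass2, hb2]
    | cons y rest =>
      by_cases hx : fv < x
      · -- displacement: A's new state is (x, i, fv, fp)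
        rw [pvGoA_step_pos hx, pvPass1_step_pos hx]
        have hxT : x ≤ (pvPass1 (y :: rest) (i + 1) x i).1 := pvPass1_fst_ge _ _ _ _
        rcases hinv with ⟨heq, hlt⟩ | ⟨heq, hTeq⟩
        · injection heq with hb1 hb2
          rw [pvPass1_step_pos hx] at hlt
          by_cases hxlt : x < (pvPass1 (y :: rest) (i + 1) x i).1
          · -- x itself will be displaced later: pass 2 takes x at index i
            rw [pvPass2_step_pos ⟨by omega, hxlt⟩]
            exact ih (i + 1) x i fv fp x i (le_of_lt hx) (Or.inl ⟨rfl, hxlt⟩)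
          · -- x is the final maximum
            have hTeq : x = (pvPass1 (y :: rest) (i + 1) x i).1 := by omega
            rw [pvPass2_step_neg (by intro h; exact hxlt h.2)]
            exact ih (i + 1) x i fv fp bv bp (le_of_lt hx)
              (Or.inr ⟨by rw [hb1, hb2], hTeq⟩)
        · -- fv = T but fv < x ≤ T: impossible
          rw [pvPass1_step_pos hx] at hTeq
          omega
      · -- no displacement: both scans see the same condition and stay in sync
        rw [pvGoA_step_neg hx, pvPass1_step_neg hx]
        rcases hinv with ⟨heq, hlt⟩ | ⟨heq, hTeq⟩
        · injection heq with hb1 hb2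
          rw [pvPass1_step_neg hx] at hlt
          rw [pvPass2_step_neg (by intro h; rw [hb1] at h; omega)]
          by_cases hA : sv < x ∧ x < fv
          · rw [if_pos hA]
            exact ih (i + 1) fv fp x i bv bp (le_of_lt hA.2) (Or.inl ⟨by rw [hb1, hb2], hlt⟩)
          · rw [if_neg hA]
            exact ih (i + 1) fv fp sv sp bv bp hle (Or.inl ⟨by rw [hb1, hb2], hlt⟩)
        · injection heq with hb1 hb2
          rw [pvPass1_step_neg hx] at hTeq
          by_cases hA : sv < x ∧ x < fv
          · rw [if_pos hA, pvPass2_step_pos ⟨by rw [hb1]; exact hA.1, hTeq ▸ hA.2⟩]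
            exact ih (i + 1) fv fp x i x i (le_of_lt hA.2) (Or.inr ⟨rfl, hTeq⟩)
          · rw [if_neg hA, pvPass2_step_neg (by rw [hb1, ← hTeq]; exact hA)]
            rw [hb1, hb2]
            exact ih (i + 1) fv fp sv sp sv sp hle (Or.inr ⟨rfl, hTeq⟩)

-- ===== VERDICT (by name: the statement is the Claim_ definition above) =====
theorem obtenerSenadoresEnProvincia_spec : Claim_equal_obtenerSenadoresEnProvincia := by
  intro l _
  unfold Spec_obtenerSenadoresEnProvincia obtenerSenadoresEnProvincia obtenerSenadoresEnProvincia_alt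
  have h0 : (0 : Int) ≤ (pvPass1 l 0 0 0).1 := pvPass1_fst_ge l 0 0 0
  rcases lt_or_eq_of_le h0 with h | h
  · exact pvMain l 0 0 0 0 0 0 0 le_rfl (Or.inl ⟨rfl, h⟩)
  · exact pvMain l 0 0 0 0 0 0 0 le_rfl (Or.inr ⟨rfl, h⟩)
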